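-- pv_equiv track=rewrite | github.com/lsasi/EyeC_System | Synopsys DAC Bringup/DAC_Bringup.py | extract_bit
-- ===== SOURCE A (Python) =====
-- def extract_bit(z):
--     t_0_11 = []
--     for j in range(12):
--         tt = []
--         for i in range(z.__len__()):
--             tt.append(int((z[i] & 2 ** j) >> j))
--         t_0_11.append(tt)
--     t_12_27 = []
--     for j in range(12):
--         ff = []
--         for i in range(z.__len__()):
--             ff.append(int((z[i] & 2 ** (16 + j)) / 2 ** (16 + j)))
--         t_12_27.append(ff)
--
--     lst = [0] * t_12_27[0].__len__()
--     f = []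
--     for i in t_0_11:
--         f.append(i)
--     for i in range(4):
--         f.append(lst)
--     for i in t_12_27:
--         f.append(i)
--     for i in range(4):
--         f.append(lst)
--     return f
-- ===== SOURCE B (Python) =====
-- def extract_bit(z):
--     # Element-major instead of plane-major: decompose each sample into its
--     # 32-entry bit column under a single mask constant (planes 0-11 and 16-27
--     # carry real bits, planes 12-15 and 28-31 are forced zero), then transpose
--     # the columns into planes.
--     MASK = 0x0FFF0FFF
--     cols = [[(x >> b) & 1 if MASK >> b & 1 else 0 for b in range(32)] for x in z]
--     return [[c[b] for c in cols] for b in range(32)]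
-- ===== Notes on version B (the rewrite author's own statement) =====
-- stated objective: alternative
-- what changed: A builds planes plane-major in four staged append loops (two extraction loop nests plus a four-part assembly phase); B traverses the data element-major, decomposing each sample into a 32-entry bit column under one mask constant 0x0FFF0FFF and then transposing the columns into planes.
import Mathlib
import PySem

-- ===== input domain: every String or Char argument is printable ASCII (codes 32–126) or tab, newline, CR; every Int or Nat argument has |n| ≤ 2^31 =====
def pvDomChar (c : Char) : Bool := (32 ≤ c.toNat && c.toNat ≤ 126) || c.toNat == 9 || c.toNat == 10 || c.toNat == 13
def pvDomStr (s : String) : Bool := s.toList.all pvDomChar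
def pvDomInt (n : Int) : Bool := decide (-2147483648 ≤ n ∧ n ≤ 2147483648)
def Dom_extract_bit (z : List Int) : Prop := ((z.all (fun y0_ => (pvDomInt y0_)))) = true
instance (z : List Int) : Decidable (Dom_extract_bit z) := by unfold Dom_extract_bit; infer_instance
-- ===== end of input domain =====

-- B replaces A's plane-major staged append loops by an element-major pass:
-- each sample becomes a 32-entry bit column under one mask constant, and the
-- columns are transposed into planes (objective: alternative); return values are proved equal.

-- ===== PORT A =====
-- every j drawn from range(12) is nonnegative, so `2 ** j` is `2 ^ j.toNat` and `>> j` is `>>> j.toNat`, exactly;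
-- `int((z[i] & 2**(16+j)) / 2**(16+j))` : the numerator is 0 or 2^(16+j) ≤ 2^27 < 2^53, so Python's
-- int-of-true-division is exactly PySem.Int.truncdiv there.
def extract_bit (z : List Int) : List (List Int) :=
  let t_0_11 := (PySem.List.pyRange 0 12 1).foldl (fun t j =>
    t ++ [(PySem.List.pyRange 0 (z.length : Int) 1).foldl (fun tt i =>
      tt ++ [PySem.Int.band (PySem.List.pyGetD z i 0) (2 ^ j.toNat) >>> j.toNat]) []]) []
  let t_12_27 := (PySem.List.pyRange 0 12 1).foldl (fun t j =>
    t ++ [(PySem.List.pyRange 0 (z.length : Int) 1).foldl (fun ff i =>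
      ff ++ [PySem.Int.truncdiv (PySem.Int.band (PySem.List.pyGetD z i 0) (2 ^ (16 + j.toNat)))
        (2 ^ (16 + j.toNat))]) []]) []
  let lst := List.replicate (PySem.List.pyGetD t_12_27 0 []).length (0 : Int)
  let f1 := t_0_11.foldl (fun f i => f ++ [i]) []
  let f2 := (PySem.List.pyRange 0 4 1).foldl (fun f _ => f ++ [lst]) f1
  let f3 := t_12_27.foldl (fun f i => f ++ [i]) f2
  (PySem.List.pyRange 0 4 1).foldl (fun f _ => f ++ [lst]) f3

-- ===== PORT B =====
-- every b drawn from range(32) is nonnegative, so `>> b` is `>>> b.toNat`, exactly;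
-- Python's truthiness of the int `MASK >> b & 1` is `≠ 0`; `c[b]` always has 0 ≤ b < 32 = len(c),
-- so the IndexError branch of indexing is unreachable and `pyGetD … 0` is exact.
def extract_bit_alt (z : List Int) : List (List Int) :=
  let MASK : Int := 0x0FFF0FFF
  let cols := z.map (fun x => (PySem.List.pyRange 0 32 1).map (fun b =>
    if PySem.Int.band (MASK >>> b.toNat) 1 ≠ 0 then PySem.Int.band (x >>> b.toNat) 1 else 0))
  (PySem.List.pyRange 0 32 1).map (fun b => cols.map (fun c => PySem.List.pyGetD c b 0))

-- ===== PRECONDITION & SPEC =====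
def Spec_extract_bit (z : List Int) (out : List (List Int)) : Prop := out = extract_bit_alt z
instance (z : List Int) (out : List (List Int)) : Decidable (Spec_extract_bit z out) := by unfold Spec_extract_bit; infer_instance

-- ===== CLAIM (what is proved, stated in full; the proofs are below) =====
def Claim_equal_extract_bit : Prop := ∀ (z : List Int), Dom_extract_bit z → Spec_extract_bit z (extract_bit z)

-- ===== LEMMAS AND PROOFS =====

-- the 0/1 value of bit k of x, as Python arithmetic
def pvBit (x : Int) (k : Nat) : Int := PySem.Int.mod (x >>> k) 2

lemma pvBit_mem (x : Int) (k : Nat) : pvBit x k = 0 ∨ pvBit x k = 1 := by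
  have h1 := PySem.Int.mod_nonneg (x >>> k) (b := 2) (by norm_num)
  have h2 := PySem.Int.mod_lt (x >>> k) (b := 2) (by norm_num)
  unfold pvBit; omega

-- key bit identity: masking with 2^k isolates 2^k · (bit k of x), also for negative x
lemma band_two_pow (x : Int) (k : Nat) :
    PySem.Int.band x (2 ^ k) = 2 ^ k * pvBit x k := by
  have hp : ((2:Int) ^ k) = ((2 ^ k : Nat) : Int) := by push_cast; ring
  cases x with
  | ofNat m =>
    have hs : ((m:Int)) >>> k = ((m >>> k : Nat) : Int) := by
      simp [Int.shiftRight_eq_div_pow, Nat.shiftRight_eq_div_pow]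
    unfold pvBit
    rw [Int.ofNat_eq_natCast, hp, PySem.Int.band_natCast, hs,
      PySem.Int.mod_eq_emod_of_pos (by norm_num),
      Nat.and_two_pow, Nat.testBit_eq_decide_div_mod_eq, Nat.shiftRight_eq_div_pow]
    rcases Nat.mod_two_eq_zero_or_one (m / 2 ^ k) with h | h
    · have he : ((m / 2 ^ k : Nat) : Int) % 2 = 0 := by omega
      rw [he]; simp [h]
    · have he : ((m / 2 ^ k : Nat) : Int) % 2 = 1 := by omega
      rw [he]; simp [h]
  | negSucc m =>
    unfold pvBit
    rw [Int.negSucc_shiftRight, PySem.Int.mod_eq_emod_of_pos (by norm_num)]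
    unfold PySem.Int.band
    rw [if_neg (by omega), if_pos (by positivity)]
    have h1 : ((2:Int) ^ k).toNat = 2 ^ k := by rw [hp, Int.toNat_natCast]
    have h2 : (-Int.negSucc m - 1).toNat = m := by rw [Int.negSucc_eq]; simp
    rw [h1, h2, Nat.two_pow_and, Nat.testBit_eq_decide_div_mod_eq,
      Int.negSucc_eq, Nat.shiftRight_eq_div_pow, hp]
    rcases Nat.mod_two_eq_zero_or_one (m / 2 ^ k) with h | h
    · have he : (-((m / 2 ^ k : Nat) : Int) - 1) % 2 = 1 := by omega
      rw [neg_add', he]; simp [h]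
    · have he : (-((m / 2 ^ k : Nat) : Int) - 1) % 2 = 0 := by omega
      rw [neg_add', he]; simp [h]

lemma shift_band (x : Int) (k : Nat) :
    PySem.Int.band x (2 ^ k) >>> k = PySem.Int.band (x >>> k) 1 := by
  rw [band_two_pow, PySem.Int.band_one]
  show (2 ^ k * pvBit x k) >>> k = pvBit x k
  rcases pvBit_mem x k with h | h <;> rw [h]
  · simp [Int.shiftRight_eq_div_pow]
  · rw [mul_one, Int.shiftRight_eq_div_pow]
    exact Int.ediv_self (by positivity)

lemma truncdiv_band (x : Int) (k : Nat) :
    PySem.Int.truncdiv (PySem.Int.band x (2 ^ k)) (2 ^ k) = PySem.Int.band (x >>> k) 1 := by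
  rw [band_two_pow, PySem.Int.band_one]
  show PySem.Int.truncdiv (2 ^ k * pvBit x k) (2 ^ k) = pvBit x k
  rcases pvBit_mem x k with h | h <;> rw [h] <;> simp [PySem.Int.truncdiv]

-- length of A's first extracted 16..27 plane (used for the shared zeros list)
lemma lst_len (z : List Int) :
    (PySem.List.pyGetD
      ((PySem.List.pyRange 0 12 1).map
        (fun x => z.map (fun y : Int => PySem.Int.band (y >>> (16 + x.toNat : Nat)) 1))) 0 []).length
    = z.length := by
  rw [PySem.List.pyRange_one_cons (a := 0) (b := 12) (by norm_num)]
  simp [PySem.List.pyGetD_zero_cons]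

-- a plane loop of A (already in map form) is the plane of bit k
lemma planeA (z : List Int) (k : Nat) :
    (PySem.List.pyRange 0 (z.length : Int) 1).map
      (fun i => PySem.Int.band (PySem.List.pyGetD z i 0) (2 ^ k) >>> ((k : Int)))
    = z.map (fun x : Int => PySem.Int.band (x >>> k) 1) := by
  have := PySem.List.map_pyGetD_pyRange_zero' (xs := z) (d := (0:Int))
  calc (PySem.List.pyRange 0 (z.length : Int) 1).map
        (fun i => PySem.Int.band (PySem.List.pyGetD z i 0) (2 ^ k) >>> ((k : Int)))
      = ((PySem.List.pyRange 0 (z.length : Int) 1).map (fun i => PySem.List.pyGetD z i 0)).map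
        (fun x => PySem.Int.band x (2 ^ k) >>> ((k : Int))) := by rw [List.map_map]; rfl
    _ = z.map (fun x : Int => PySem.Int.band (x >>> k) 1) := by
        rw [this]; ext1
        simp only [Int.shiftRight_natCast_right, shift_band]

lemma planeA' (z : List Int) (k : Nat) :
    (PySem.List.pyRange 0 (z.length : Int) 1).map
      (fun i => PySem.Int.truncdiv (PySem.Int.band (PySem.List.pyGetD z i 0) (2 ^ k)) (2 ^ k))
    = z.map (fun x : Int => PySem.Int.band (x >>> k) 1) := by
  have := PySem.List.map_pyGetD_pyRange_zero' (xs := z) (d := (0:Int))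
  calc (PySem.List.pyRange 0 (z.length : Int) 1).map
        (fun i => PySem.Int.truncdiv (PySem.Int.band (PySem.List.pyGetD z i 0) (2 ^ k)) (2 ^ k))
      = ((PySem.List.pyRange 0 (z.length : Int) 1).map (fun i => PySem.List.pyGetD z i 0)).map
        (fun x => PySem.Int.truncdiv (PySem.Int.band x (2 ^ k)) (2 ^ k)) := by
          rw [List.map_map]; rfl
    _ = z.map (fun x : Int => PySem.Int.band (x >>> k) 1) := by
        rw [this]; ext1
        simp only [truncdiv_band]

-- ===== VERDICT (by name: the statement is the Claim_ definition above) =====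
set_option maxHeartbeats 2000000 in
theorem extract_bit_spec : Claim_equal_extract_bit := by
  intro z _
  unfold Spec_extract_bit extract_bit extract_bit_alt
  simp only [PySem.List.foldl_append_singleton_eq_map, List.nil_append, List.map_id',
    planeA, planeA']
  rw [lst_len]
  simp only [PySem.List.pyRange_one]
  norm_num [show Int.toNat 12 = 12 from rfl, show Int.toNat 4 = 4 from rfl,
    show Int.toNat 32 = 32 from rfl, List.range_succ, List.map_map, Function.comp_def, PySem.Int.band_one,
    PySem.Int.mod_eq_emod_of_pos, Int.shiftRight_eq_div_pow, PySem.List.pyGetD_ofNat',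
    List.map_const', Int.shiftRight_natCast_right,
    show Int.toNat 0 = 0 from by decide,
    show ((268374015:Int) >>> ((0:Int)) % 2) = 1 from by decide,
    show Int.toNat 1 = 1 from by decide,
    show ((268374015:Int) >>> ((1:Int)) % 2) = 1 from by decide,
    show Int.toNat 2 = 2 from by decide,
    show ((268374015:Int) >>> ((2:Int)) % 2) = 1 from by decide,
    show Int.toNat 3 = 3 from by decide,
    show ((268374015:Int) >>> ((3:Int)) % 2) = 1 from by decide,
    show Int.toNat 4 = 4 from by decide,
    show ((268374015:Int) >>> ((4:Int)) % 2) = 1 from by decide,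
    show Int.toNat 5 = 5 from by decide,
    show ((268374015:Int) >>> ((5:Int)) % 2) = 1 from by decide,
    show Int.toNat 6 = 6 from by decide,
    show ((268374015:Int) >>> ((6:Int)) % 2) = 1 from by decide,
    show Int.toNat 7 = 7 from by decide,
    show ((268374015:Int) >>> ((7:Int)) % 2) = 1 from by decide,
    show Int.toNat 8 = 8 from by decide,
    show ((268374015:Int) >>> ((8:Int)) % 2) = 1 from by decide,
    show Int.toNat 9 = 9 from by decide,
    show ((268374015:Int) >>> ((9:Int)) % 2) = 1 from by decide,
    show Int.toNat 10 = 10 from by decide,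
    show ((268374015:Int) >>> ((10:Int)) % 2) = 1 from by decide,
    show Int.toNat 11 = 11 from by decide,
    show ((268374015:Int) >>> ((11:Int)) % 2) = 1 from by decide,
    show Int.toNat 12 = 12 from by decide,
    show ((268374015:Int) >>> ((12:Int)) % 2) = 0 from by decide,
    show Int.toNat 13 = 13 from by decide,
    show ((268374015:Int) >>> ((13:Int)) % 2) = 0 from by decide,
    show Int.toNat 14 = 14 from by decide,
    show ((268374015:Int) >>> ((14:Int)) % 2) = 0 from by decide,
    show Int.toNat 15 = 15 from by decide,
    show ((268374015:Int) >>> ((15:Int)) % 2) = 0 from by decide,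
    show Int.toNat 16 = 16 from by decide,
    show ((268374015:Int) >>> ((16:Int)) % 2) = 1 from by decide,
    show Int.toNat 17 = 17 from by decide,
    show ((268374015:Int) >>> ((17:Int)) % 2) = 1 from by decide,
    show Int.toNat 18 = 18 from by decide,
    show ((268374015:Int) >>> ((18:Int)) % 2) = 1 from by decide,
    show Int.toNat 19 = 19 from by decide,
    show ((268374015:Int) >>> ((19:Int)) % 2) = 1 from by decide,
    show Int.toNat 20 = 20 from by decide,
    show ((268374015:Int) >>> ((20:Int)) % 2) = 1 from by decide,
    show Int.toNat 21 = 21 from by decide,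
    show ((268374015:Int) >>> ((21:Int)) % 2) = 1 from by decide,
    show Int.toNat 22 = 22 from by decide,
    show ((268374015:Int) >>> ((22:Int)) % 2) = 1 from by decide,
    show Int.toNat 23 = 23 from by decide,
    show ((268374015:Int) >>> ((23:Int)) % 2) = 1 from by decide,
    show Int.toNat 24 = 24 from by decide,
    show ((268374015:Int) >>> ((24:Int)) % 2) = 1 from by decide,
    show Int.toNat 25 = 25 from by decide,
    show ((268374015:Int) >>> ((25:Int)) % 2) = 1 from by decide,
    show Int.toNat 26 = 26 from by decide,
    show ((268374015:Int) >>> ((26:Int)) % 2) = 1 from by decide,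
    show Int.toNat 27 = 27 from by decide,
    show ((268374015:Int) >>> ((27:Int)) % 2) = 1 from by decide,
    show Int.toNat 28 = 28 from by decide,
    show ((268374015:Int) >>> ((28:Int)) % 2) = 0 from by decide,
    show Int.toNat 29 = 29 from by decide,
    show ((268374015:Int) >>> ((29:Int)) % 2) = 0 from by decide,
    show Int.toNat 30 = 30 from by decide,
    show ((268374015:Int) >>> ((30:Int)) % 2) = 0 from by decide,
    show Int.toNat 31 = 31 from by decide,
    show ((268374015:Int) >>> ((31:Int)) % 2) = 0 from by decide]
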